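-- pv_equiv track=rewrite | github.com/CesarPumacayo/pp_lab1_Cesar_Pumacayo | Examen_parcial/funciones.py | obtener_jugadores_mayor_temporadas
-- ===== SOURCE A (Python) =====
-- def obtener_jugadores_mayor_temporadas(lista_jugadores):
--     jugadores_mayor_temporadas = []
--     mayor_cantidad_temporadas = 0
--
--     for jugador in lista_jugadores:
--         cantidad_temporadas = jugador['estadisticas']['temporadas']
--         if cantidad_temporadas > mayor_cantidad_temporadas:
--             mayor_cantidad_temporadas = cantidad_temporadas
--             jugadores_mayor_temporadas = [jugador]
--         elif cantidad_temporadas == mayor_cantidad_temporadas: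
--             jugadores_mayor_temporadas.append(jugador)
--
--     return jugadores_mayor_temporadas
-- ===== SOURCE B (Python) =====
-- def obtener_jugadores_mayor_temporadas(lista_jugadores):
--     valores = [j['estadisticas']['temporadas'] for j in lista_jugadores]
--     objetivo = max([0] + valores)
--     return [j for j, v in zip(lista_jugadores, valores) if v == objetivo]
-- ===== Notes on version B (the rewrite author's own statement) =====
-- stated objective: simpler
-- what changed: Replaces the running-max accumulator loop (which rebuilds/extends the result list as it goes) by two plain passes: compute the maximum season count (with 0 included, matching A's initial threshold) and then filter the players that reach it.
import Mathlib
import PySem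

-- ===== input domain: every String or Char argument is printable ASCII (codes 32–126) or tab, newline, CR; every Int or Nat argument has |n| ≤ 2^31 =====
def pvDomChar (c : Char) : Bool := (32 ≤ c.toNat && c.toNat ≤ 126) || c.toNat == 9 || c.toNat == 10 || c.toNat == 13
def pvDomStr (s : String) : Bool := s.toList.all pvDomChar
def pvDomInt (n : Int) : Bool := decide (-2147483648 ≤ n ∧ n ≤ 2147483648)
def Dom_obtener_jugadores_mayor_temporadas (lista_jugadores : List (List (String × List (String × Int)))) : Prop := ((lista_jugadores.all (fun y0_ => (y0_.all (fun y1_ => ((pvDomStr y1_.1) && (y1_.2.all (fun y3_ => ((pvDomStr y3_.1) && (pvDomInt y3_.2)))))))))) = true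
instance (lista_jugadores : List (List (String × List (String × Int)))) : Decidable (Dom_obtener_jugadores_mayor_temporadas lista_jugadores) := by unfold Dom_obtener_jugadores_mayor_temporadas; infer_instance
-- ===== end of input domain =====

set_option maxRecDepth 8000


-- B replaces A's running-max accumulator loop by a max pass followed by a filter pass (simpler decomposition, same cost).

-- shared helper: jugador['estadisticas']['temporadas'] (default 0 is never used inside Pre_,
-- which requires both keys to be present)
def pvTemporadas (jugador : List (String × List (String × Int))) : Int :=
  (((jugador.lookup "estadisticas").getD []).lookup "temporadas").getD 0

-- ===== PORT A =====
def obtener_jugadores_mayor_temporadas (lista_jugadores : List (List (String × List (String × Int)))) : List (List (String × List (String × Int))) :=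
  (lista_jugadores.foldl
    (fun (st : List (List (String × List (String × Int))) × Int) jugador =>
      let cantidad_temporadas := pvTemporadas jugador
      if cantidad_temporadas > st.2 then ([jugador], cantidad_temporadas)
      else if cantidad_temporadas = st.2 then (st.1 ++ [jugador], st.2)
      else st)
    ([], 0)).1

-- ===== PORT B =====
def obtener_jugadores_mayor_temporadas_alt (lista_jugadores : List (List (String × List (String × Int)))) : List (List (String × List (String × Int))) :=
  let valores := lista_jugadores.map pvTemporadas
  let objetivo := (PySem.List.max? ((0 : Int) :: valores) (fun v => v)).getD 0
  ((lista_jugadores.zip valores).filter (fun p => p.2 = objetivo)).map Prod.fst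

-- ===== PRECONDITION & SPEC =====
-- Pre_ excludes exactly the inputs where the Python A raises KeyError: a player missing the
-- 'estadisticas' key or whose stats dict is missing 'temporadas'.
def Pre_obtener_jugadores_mayor_temporadas (lista_jugadores : List (List (String × List (String × Int)))) : Prop :=
  ∀ j ∈ lista_jugadores,
    ((j.lookup "estadisticas").bind (fun d => d.lookup "temporadas")).isSome = true
instance (lista_jugadores : List (List (String × List (String × Int)))) : Decidable (Pre_obtener_jugadores_mayor_temporadas lista_jugadores) := by unfold Pre_obtener_jugadores_mayor_temporadas; infer_instance

def pvWitness_obtener_jugadores_mayor_temporadas : (List (List (String × List (String × Int)))) :=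
  [[("estadisticas", [("temporadas", 3)])], [("estadisticas", [("temporadas", 5)])]]

def Spec_obtener_jugadores_mayor_temporadas (lista_jugadores : List (List (String × List (String × Int)))) (out : List (List (String × List (String × Int)))) : Prop := out = obtener_jugadores_mayor_temporadas_alt lista_jugadores
instance (lista_jugadores : List (List (String × List (String × Int)))) (out : List (List (String × List (String × Int)))) : Decidable (Spec_obtener_jugadores_mayor_temporadas lista_jugadores out) := by unfold Spec_obtener_jugadores_mayor_temporadas; infer_instance

-- ===== CLAIM (what is proved, stated in full; the proofs are below) =====
def Claim_equal_obtener_jugadores_mayor_temporadas : Prop := ∀ (lista_jugadores : List (List (String × List (String × Int)))), Dom_obtener_jugadores_mayor_temporadas lista_jugadores → Pre_obtener_jugadores_mayor_temporadas lista_jugadores → Spec_obtener_jugadores_mayor_temporadas lista_jugadores (obtener_jugadores_mayor_temporadas lista_jugadores)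

-- ===== LEMMAS AND PROOFS =====

-- the running max only grows
theorem pv_le_foldl_max (t : List (List (String × List (String × Int)))) (m : Int) :
    m ≤ t.foldl (fun a j => max a (pvTemporadas j)) m := by
  induction t generalizing m with
  | nil => simp
  | cons x xs ihx => exact le_trans (le_max_left _ _) (ihx (max m (pvTemporadas x)))

-- A's loop, starting from (acc, m), returns (prefix kept iff m is already the final max) ++
-- (players whose season count equals the final running max), paired with that max.
theorem pvFoldA_char (l : List (List (String × List (String × Int))))
    (acc : List (List (String × List (String × Int)))) (m : Int) :
    l.foldl
      (fun (st : List (List (String × List (String × Int))) × Int) jugador =>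
        let c := pvTemporadas jugador
        if c > st.2 then ([jugador], c)
        else if c = st.2 then (st.1 ++ [jugador], st.2)
        else st)
      (acc, m)
    = ((if m = l.foldl (fun a j => max a (pvTemporadas j)) m then acc else [])
        ++ l.filter (fun j => pvTemporadas j = l.foldl (fun a j => max a (pvTemporadas j)) m),
       l.foldl (fun a j => max a (pvTemporadas j)) m) := by
  induction l generalizing acc m with
  | nil => simp
  | cons j t ih =>
    by_cases h1 : pvTemporadas j > m
    · have hmax : max m (pvTemporadas j) = pvTemporadas j := max_eq_right (le_of_lt h1)
      simp only [List.foldl_cons, List.filter_cons, if_pos h1, hmax, ih]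
      have hne : m ≠ t.foldl (fun a j => max a (pvTemporadas j)) (pvTemporadas j) :=
        ne_of_lt (lt_of_lt_of_le h1 (pv_le_foldl_max t _))
      rw [if_neg hne]
      by_cases h2 : pvTemporadas j = t.foldl (fun a j => max a (pvTemporadas j)) (pvTemporadas j)
      · simp [← h2]
      · simp [h2]
    · by_cases h2 : pvTemporadas j = m
      · have hmax : max m (pvTemporadas j) = m := by omega
        simp only [List.foldl_cons, List.filter_cons, if_neg (by omega : ¬ pvTemporadas j > m),
          if_pos h2, hmax, ih]
        by_cases h3 : m = t.foldl (fun a j => max a (pvTemporadas j)) m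
        · have h4 : pvTemporadas j = t.foldl (fun a j => max a (pvTemporadas j)) m := h2.trans h3
          simp only [← h3]
          simp [h2]
        · have h4 : ¬ pvTemporadas j = t.foldl (fun a j => max a (pvTemporadas j)) m := by
            rw [h2]; exact h3
          simp [h3, h4]
      · have hmax : max m (pvTemporadas j) = m := by omega
        simp only [List.foldl_cons, List.filter_cons, if_neg (by omega : ¬ pvTemporadas j > m),
          if_neg h2, hmax, ih]
        have h4 : ¬ pvTemporadas j = t.foldl (fun a j => max a (pvTemporadas j)) m := by
          have := pv_le_foldl_max t m
          omega
        simp [h4]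

-- filtering the (player, value) zip by value and projecting = filtering players by their value
theorem pvZipFilter (l : List (List (String × List (String × Int)))) (v : Int) :
    ((l.zip (l.map pvTemporadas)).filter (fun p => p.2 = v)).map Prod.fst
      = l.filter (fun j => pvTemporadas j = v) := by
  induction l with
  | nil => rfl
  | cons j t ih =>
    simp only [List.map_cons, List.zip_cons_cons, List.filter_cons]
    by_cases h : pvTemporadas j = v
    · simp [h, ih]
    · simp [h, ih]

-- ===== VERDICT (by name: the statement is the Claim_ definition above) =====
theorem obtener_jugadores_mayor_temporadas_spec : Claim_equal_obtener_jugadores_mayor_temporadas := by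
  intro l _ _
  unfold Spec_obtener_jugadores_mayor_temporadas
  unfold obtener_jugadores_mayor_temporadas obtener_jugadores_mayor_temporadas_alt
  rw [pvFoldA_char, pvZipFilter]
  simp only [PySem.List.max?_id_cons, Option.getD_some]
  have hfold : (l.map pvTemporadas).foldl max 0
      = l.foldl (fun a j => max a (pvTemporadas j)) 0 := by
    rw [List.foldl_map]
  rw [hfold]
  by_cases h : (0 : Int) = l.foldl (fun a j => max a (pvTemporadas j)) 0
  · simp [← h]
  · simp [h]
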